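-- pv_equiv track=rewrite | github.com/kimmel25/ohr-haNer | backend/tools/transliteration_map.py | _combine_words
-- ===== SOURCE A (Python) =====
-- from typing import List, Dict, Tuple, Optional, Set
--
-- def _combine_words(all_variants: List[List[str]], max_total: int) -> List[str]:
--     """Combine word variants into phrase variants."""
--     if not all_variants:
--         return []
--
--     if len(all_variants) == 1:
--         return all_variants[0][:max_total]
--
--     combined = []
--     num_words = len(all_variants)
--     per_word = 4 if num_words == 2 else (2 if num_words <= 4 else 1)
--
--     def combine_recursive(idx: int, parts: List[str]):
--         if len(combined) >= max_total:
--             return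
--         if idx >= num_words:
--             combined.append(" ".join(parts))
--             return
--         for variant in all_variants[idx][:per_word]:
--             combine_recursive(idx + 1, parts + [variant])
--
--     combine_recursive(0, [])
--     return combined[:max_total]
-- ===== SOURCE B (Python) =====
-- from itertools import islice, product
--
--
-- def _combine_words(all_variants, max_total):
--     """Combine word variants into phrase variants."""
--     if not all_variants:
--         return []
--
--     if len(all_variants) == 1:
--         return all_variants[0][:max_total]
--
--     num_words = len(all_variants)
--     per_word = 4 if num_words == 2 else (2 if num_words <= 4 else 1)
--     truncated = [v[:per_word] for v in all_variants]
--     combos = product(*truncated)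
--     return [" ".join(c) for c in islice(combos, max(max_total, 0))]
-- ===== Notes on version B (the rewrite author's own statement) =====
-- stated objective: idiomatic
-- what changed: The hand-written recursion with a shared mutable accumulator and early-exit cap is replaced by itertools.product over the pre-truncated variant lists, capped lazily with itertools.islice.
import Mathlib
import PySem

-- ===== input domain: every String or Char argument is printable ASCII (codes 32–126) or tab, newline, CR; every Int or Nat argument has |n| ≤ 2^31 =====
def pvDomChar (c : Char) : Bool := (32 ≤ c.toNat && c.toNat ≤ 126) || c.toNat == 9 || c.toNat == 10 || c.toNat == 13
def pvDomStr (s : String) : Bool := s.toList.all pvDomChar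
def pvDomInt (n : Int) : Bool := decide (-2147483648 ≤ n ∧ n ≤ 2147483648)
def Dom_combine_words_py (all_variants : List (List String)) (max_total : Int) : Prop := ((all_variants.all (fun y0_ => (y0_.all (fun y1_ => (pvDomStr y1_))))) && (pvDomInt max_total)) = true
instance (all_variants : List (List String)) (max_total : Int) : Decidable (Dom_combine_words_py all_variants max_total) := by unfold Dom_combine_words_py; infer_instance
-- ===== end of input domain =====

-- B replaces A's recursive enumeration with a mutable capped accumulator by an
-- itertools.product/islice pipeline over pre-truncated variant lists (idiomatic; same cost).

-- ===== PORT A =====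
-- the inner function combine_recursive: idx-indexing ported as structural recursion on the
-- remaining suffix of all_variants (idx >= num_words ↔ suffix empty)
def combineRecA (mt pw : Int) : List (List String) → List String → List String → List String
  | rest, parts, combined =>
    if (combined.length : Int) ≥ mt then combined
    else
      match rest with
      | [] => combined ++ [PySem.Str.join " " parts]
      | ws :: rest' =>
          (PySem.List.slice ws none (some pw)).foldl
            (fun acc v => combineRecA mt pw rest' (parts ++ [v]) acc) combined

def combine_words_py (all_variants : List (List String)) (max_total : Int) : List String :=
  if all_variants = [] then []
  else if all_variants.length = 1 then
    PySem.List.slice (all_variants.headD []) none (some max_total)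
  else
    let num_words : Int := all_variants.length
    let per_word : Int := if num_words = 2 then 4 else if num_words ≤ 4 then 2 else 1
    PySem.List.slice (combineRecA max_total per_word all_variants [] []) none (some max_total)

-- ===== PORT B =====
-- itertools.product(*truncated) in the order Python emits tuples (rightmost fastest)
def prodB : List (List String) → List (List String)
  | [] => [[]]
  | xs :: rest => xs.flatMap (fun x => (prodB rest).map (fun t => x :: t))

def combine_words_py_alt (all_variants : List (List String)) (max_total : Int) : List String :=
  if all_variants = [] then []
  else if all_variants.length = 1 then
    PySem.List.slice (all_variants.headD []) none (some max_total)
  else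
    let num_words : Int := all_variants.length
    let per_word : Int := if num_words = 2 then 4 else if num_words ≤ 4 then 2 else 1
    let truncated := all_variants.map (fun v => PySem.List.slice v none (some per_word))
    -- islice(..., max(max_total, 0)) = take of the (finite) product
    ((prodB truncated).map (fun c => PySem.Str.join " " c)).take (max max_total 0).toNat

-- ===== PRECONDITION & SPEC =====
def Spec_combine_words_py (all_variants : List (List String)) (max_total : Int) (out : List String) : Prop := out = combine_words_py_alt all_variants max_total
instance (all_variants : List (List String)) (max_total : Int) (out : List String) : Decidable (Spec_combine_words_py all_variants max_total out) := by unfold Spec_combine_words_py; infer_instance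

-- ===== CLAIM (what is proved, stated in full; the proofs are below) =====
def Claim_equal_combine_words_py : Prop := ∀ (all_variants : List (List String)) (max_total : Int), Dom_combine_words_py all_variants max_total → Spec_combine_words_py all_variants max_total (combine_words_py all_variants max_total)

-- ===== LEMMAS AND PROOFS =====

theorem recA_nil_of_nonpos (mt pw : Int) (rest : List (List String)) (parts : List String)
    (h : mt ≤ 0) : combineRecA mt pw rest parts [] = [] := by
  cases rest with
  | nil => rw [combineRecA]; simp [h]
  | cons ws rest' => rw [combineRecA]; simp [h]

theorem take_take_append {α : Type} (X Y : List α) (N : Nat) :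
    (X.take N ++ Y).take N = (X ++ Y).take N := by
  rw [List.take_append, List.take_append, List.take_take, Nat.min_self, List.length_take]
  rcases le_total X.length N with h | h
  · rw [Nat.min_eq_right h]
  · rw [Nat.min_eq_left h, Nat.sub_eq_zero_of_le h, Nat.sub_eq_zero_of_le (le_refl _)]

theorem recA_eq (mt pw : Int) :
    ∀ (rest : List (List String)) (parts combined : List String),
      (combined.length : Int) ≤ mt →
      combineRecA mt pw rest parts combined
        = (combined ++ (prodB (rest.map (fun v => PySem.List.slice v none (some pw)))).map
            (fun t => PySem.Str.join " " (parts ++ t))).take mt.toNat := by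
  intro rest
  induction rest with
  | nil =>
    intro parts combined h
    rw [combineRecA]
    by_cases hge : (combined.length : Int) ≥ mt
    · have hlen : combined.length = mt.toNat := by omega
      simp [hge, prodB, ← hlen]
    · have hlt : combined.length + 1 ≤ mt.toNat := by omega
      rw [if_neg hge]
      simp [prodB]
      omega
  | cons ws rest' ih =>
    intro parts combined h
    rw [combineRecA]
    by_cases hge : (combined.length : Int) ≥ mt
    · have hlen : combined.length = mt.toNat := by omega
      simp [hge, ← hlen]
    · rw [if_neg hge]
      have hmt : 0 ≤ mt := by omega
      have aux : ∀ (vs : List String) (c : List String), (c.length : Int) ≤ mt →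
          vs.foldl (fun acc v => combineRecA mt pw rest' (parts ++ [v]) acc) c
            = (c ++ vs.flatMap (fun v =>
                (prodB (rest'.map (fun w => PySem.List.slice w none (some pw)))).map
                  (fun t => PySem.Str.join " " ((parts ++ [v]) ++ t)))).take mt.toNat := by
        intro vs
        induction vs with
        | nil =>
          intro c hc
          simp
          omega
        | cons v vs' ihv =>
          intro c hc
          simp only [List.foldl_cons]
          rw [ih (parts ++ [v]) c hc]
          rw [ihv _ (by
            have := List.length_take_le mt.toNat
              (c ++ (prodB (rest'.map (fun w => PySem.List.slice w none (some pw)))).map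
                (fun t => PySem.Str.join " " ((parts ++ [v]) ++ t)))
            omega)]
          rw [take_take_append]
          simp [List.flatMap_cons, List.append_assoc]
      rw [aux _ combined (by omega)]
      congr 1
      simp [prodB, List.map_flatMap, List.map_map, Function.comp_def]

-- ===== VERDICT (by name: the statement is the Claim_ definition above) =====
theorem combine_words_py_spec : Claim_equal_combine_words_py := by
  intro avs mt _
  unfold Spec_combine_words_py combine_words_py combine_words_py_alt
  by_cases h0 : avs = []
  · simp [h0]
  · rw [if_neg h0, if_neg h0]
    by_cases h1 : avs.length = 1
    · simp [h1]
    · rw [if_neg h1, if_neg h1]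
      dsimp only
      by_cases hmt : 0 ≤ mt
      · rw [recA_eq _ _ avs [] [] (by simpa using hmt)]
        rw [PySem.List.slice_to _ hmt]
        simp [max_eq_left hmt, List.take_take]
      · rw [recA_nil_of_nonpos _ _ _ _ (by omega)]
        have h00 : (max mt 0).toNat = 0 := by omega
        simp [h00, PySem.List.slice, PySem.List.clampIdx]
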